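-- pv_equiv track=rewrite | github.com/ffeiDing/attribute_recognition | attribute/color/buf.py | get_pic2attr
-- ===== SOURCE A (Python) =====
-- def get_id(s):
--     """
--     :param input: string
--     :return:
--     """
--     last = s.split('_')[-1]
--     return last[:-4]
--
-- def get_pic2attr(all):
--     pic2attr = {}
--     for x in all:
--         id = get_id(x)
--         if id in pic2attr:
--             pic2attr[id].append(x)
--         else:
--             pic2attr[id] = [x]
--     return pic2attr
-- ===== SOURCE B (Python) =====
-- def get_id(s):
--     """
--     :param input: string
--     :return:
--     """
--     last = s.split('_')[-1]
--     return last[:-4]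
--
-- def get_pic2attr(all):
--     # two passes: distinct ids in first-occurrence order, then gather each group by filtering
--     ids = list(dict.fromkeys(get_id(x) for x in all))
--     return {i: [x for x in all if get_id(x) == i] for i in ids}
-- ===== Notes on version B (the rewrite author's own statement) =====
-- stated objective: alternative
-- what changed: Replaces the single-pass dict accumulation (membership test + append/insert per item) with a two-pass scheme: an ordered dedup of the extracted ids followed by one filtering scan per id.
import Mathlib
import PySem

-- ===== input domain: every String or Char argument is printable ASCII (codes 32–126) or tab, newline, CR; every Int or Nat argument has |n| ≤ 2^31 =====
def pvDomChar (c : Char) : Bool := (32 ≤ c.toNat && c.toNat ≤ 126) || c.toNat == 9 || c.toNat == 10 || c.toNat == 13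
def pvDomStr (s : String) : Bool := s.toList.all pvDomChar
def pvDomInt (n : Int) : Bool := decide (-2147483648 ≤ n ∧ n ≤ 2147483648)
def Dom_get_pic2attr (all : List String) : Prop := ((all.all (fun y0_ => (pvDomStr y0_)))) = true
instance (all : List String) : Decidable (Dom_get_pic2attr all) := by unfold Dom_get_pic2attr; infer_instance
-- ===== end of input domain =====

-- B groups items by id via an ordered dedup of ids plus one filtering pass per id, instead of
-- A's single-pass dict accumulation; same return value, no speed claim.

-- shared helper get_id (identical in both Pythons)
def pv_get_id (s : String) : String :=
  let parts := (PySem.Str.split? s "_").getD []        -- s.split('_'); sep "_" ≠ "" so split? is some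
  let last := (PySem.List.pyGet? parts (-1)).getD ""   -- [-1]; split never returns [], so pyGet? is some
  PySem.Str.slice last none (some (-4))                -- last[:-4]

-- ===== PORT A =====
def get_pic2attr (all : List String) : List (String × List String) :=
  (all.foldl
    (fun d x =>
      let id := pv_get_id x
      if d.contains id then d.modify id [] (· ++ [x])  -- pic2attr[id].append(x)
      else d.insert id [x])                            -- pic2attr[id] = [x]
    PySem.Dict.empty).items

-- ===== PORT B =====
def get_pic2attr_alt (all : List String) : List (String × List String) :=
  let ids := PySem.List.dedup (all.map pv_get_id)      -- list(dict.fromkeys(...))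
  ids.map (fun i => (i, all.filter (fun x => pv_get_id x == i)))

-- ===== PRECONDITION & SPEC =====
def Spec_get_pic2attr (all : List String) (out : List (String × List String)) : Prop := out = get_pic2attr_alt all
instance (all : List String) (out : List (String × List String)) : Decidable (Spec_get_pic2attr all out) := by unfold Spec_get_pic2attr; infer_instance

-- ===== CLAIM (what is proved, stated in full; the proofs are below) =====
def Claim_equal_get_pic2attr : Prop := ∀ (all : List String), Dom_get_pic2attr all → Spec_get_pic2attr all (get_pic2attr all)

-- ===== LEMMAS AND PROOFS =====

-- A's branch (contains → append, else insert-singleton) is exactly one unconditional dict.modify.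
theorem pv_step_eq_modify (d : PySem.Dict String (List String)) (k : String) (x : String) :
    (if d.contains k then d.modify k [] (· ++ [x]) else d.insert k [x])
      = d.modify k [] (· ++ [x]) := by
  split_ifs with h
  · rfl
  · simp only [PySem.Dict.insert, PySem.Dict.modify, Bool.not_eq_true] at *
    simp [h, PySem.Dict.getD_of_not_contains]

theorem pv_foldl_eq (all : List String) :
    (all.foldl
      (fun d x =>
        let id := pv_get_id x
        if d.contains id then d.modify id [] (· ++ [x]) else d.insert id [x])
      PySem.Dict.empty)
    = ((all.map (fun x => (pv_get_id x, x))).foldl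
        (fun d p => d.modify p.1 [] (· ++ [p.2])) PySem.Dict.empty) := by
  rw [List.foldl_map]
  congr 1
  funext d x
  exact pv_step_eq_modify d (pv_get_id x) x

theorem pv_main (all : List String) : get_pic2attr all = get_pic2attr_alt all := by
  unfold get_pic2attr get_pic2attr_alt
  rw [pv_foldl_eq]
  set L := all.map (fun x => (pv_get_id x, x)) with hL
  have hnd : ((L.foldl (fun d p => d.modify p.1 [] (· ++ [p.2])) PySem.Dict.empty)).keys.Nodup := by
    exact PySem.Dict.nodup_keys_foldl_modify_key L Prod.fst [] (fun _ p => (· ++ [p.2])) _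
      PySem.Dict.nodup_keys_empty
  rw [PySem.Dict.items_eq_map_keys _ hnd []]
  have hkeys : ((L.foldl (fun d p => d.modify p.1 [] (· ++ [p.2])) PySem.Dict.empty)).keys
      = PySem.List.dedup (all.map pv_get_id) := by
    rw [PySem.Dict.keys_foldl_modify_key L Prod.fst [] (fun _ p => (· ++ [p.2]))]
    simp [hL, PySem.Set.update, PySem.Set.ofList_eq_foldl, List.map_map, Function.comp_def]
  rw [hkeys]
  apply List.map_congr_left
  intro k _
  refine Prod.ext rfl ?_
  show ((L.foldl (fun d p => d.modify p.1 [] (· ++ [p.2])) PySem.Dict.empty)).getD k []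
      = all.filter (fun x => pv_get_id x == k)
  rw [PySem.Dict.getD_foldl_modify_append]
  simp [hL, List.filter_map, List.map_map, Function.comp_def]

-- ===== VERDICT (by name: the statement is the Claim_ definition above) =====
theorem get_pic2attr_spec : Claim_equal_get_pic2attr := fun all _ => pv_main all
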